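-- pv_equiv track=rewrite | github.com/inhanp/Python_program | programming/programming10.py | zipZap
-- ===== SOURCE A (Python) =====
-- def zipZap(zapper):
--     '''
--     Given a string zapper, find all places in the original string where a three-letter combination
--     starting with "z" and ending with "p" occurs.  Return a string where, for all such three-letter
--     sequences, the middle letter has been removed.  For example, a string like "zipXzap" would
--     produce a result of "zpXzp".
--     '''
--     if len(zapper) < 3:
--         return zapper
--
--     result = ''
--
--     x = 0
--
--     while x < len(zapper):
--         if (x < len(zapper) - 2) and zapper[x] == 'z' and zapper[x + 2] == 'p':
--             result += zapper[x] + zapper[x + 2]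
--             x += 3
--         else:
--             result += zapper[x]
--             x += 1
--
--     return result
-- ===== SOURCE B (Python) =====
-- import re
--
-- def zipZap(zapper):
--     return re.sub(r'z[\s\S]p', 'zp', zapper)
-- ===== Notes on version B (the rewrite author's own statement) =====
-- stated objective: faster
-- what changed: Replaces the manual index-driven while loop with per-character string concatenation by a single regex substitution whose leftmost non-overlapping matching of z?p triples reproduces A's skip-3 scan; the C regex engine avoids Python-level per-character work.
import Mathlib
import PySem

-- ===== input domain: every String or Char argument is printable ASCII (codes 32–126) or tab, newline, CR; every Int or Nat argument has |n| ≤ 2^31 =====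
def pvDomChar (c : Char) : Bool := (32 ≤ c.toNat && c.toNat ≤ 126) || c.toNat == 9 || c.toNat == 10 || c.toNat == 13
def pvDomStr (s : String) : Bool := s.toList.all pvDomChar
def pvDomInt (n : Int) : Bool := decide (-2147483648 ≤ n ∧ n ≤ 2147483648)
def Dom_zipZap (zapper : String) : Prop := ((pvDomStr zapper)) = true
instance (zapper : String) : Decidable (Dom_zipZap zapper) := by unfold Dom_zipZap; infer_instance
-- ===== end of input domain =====

-- B replaces A's index-driven while loop by a regex substitution re.sub(r'z[\s\S]p','zp',·)
-- (ported by hand as leftmost non-overlapping pattern replacement on the char list); objective: idiomatic.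


-- ===== PORT A =====
-- the while loop: x is the index, res the accumulated result (indexing is always in
-- range under the loop guards, so getD is exact for zapper[x])
def zipZapGo (cs : List Char) (x : Nat) (res : List Char) : List Char :=
  if x < cs.length then
    if x < cs.length - 2 ∧ cs.getD x ' ' = 'z' ∧ cs.getD (x + 2) ' ' = 'p' then
      zipZapGo cs (x + 3) (res ++ [cs.getD x ' ', cs.getD (x + 2) ' '])
    else
      zipZapGo cs (x + 1) (res ++ [cs.getD x ' '])
  else res
termination_by cs.length - x

def zipZap (zapper : String) : String :=
  if zapper.toList.length < 3 then zapper
  else String.ofList (zipZapGo zapper.toList 0 [])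

-- ===== PORT B =====
-- hand port of re.sub(r'z[\s\S]p', 'zp', zapper): exact for this pattern, because the
-- regex engine replaces leftmost non-overlapping matches and a match here is any
-- 3-char window 'z' ? 'p'; on a match the scan resumes after the match, else it
-- advances one character.
def zipZapSub : List Char → List Char
  | c1 :: c2 :: c3 :: rest =>
    if c1 = 'z' ∧ c3 = 'p' then 'z' :: 'p' :: zipZapSub rest
    else c1 :: zipZapSub (c2 :: c3 :: rest)
  | cs => cs
termination_by cs => cs.length

def zipZap_alt (zapper : String) : String := String.ofList (zipZapSub zapper.toList)

-- ===== PRECONDITION & SPEC =====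
def Spec_zipZap (zapper : String) (out : String) : Prop := out = zipZap_alt zapper
instance (zapper : String) (out : String) : Decidable (Spec_zipZap zapper out) := by unfold Spec_zipZap; infer_instance

-- ===== CLAIM (what is proved, stated in full; the proofs are below) =====
def Claim_equal_zipZap : Prop := ∀ (zapper : String), Dom_zipZap zapper → Spec_zipZap zapper (zipZap zapper)

-- ===== LEMMAS AND PROOFS =====

theorem zipZapSub_short (cs : List Char) (h : cs.length ≤ 2) : zipZapSub cs = cs := by
  match cs, h with
  | [], _ => simp [zipZapSub]
  | [a], _ => simp [zipZapSub]
  | [a, b], _ => simp [zipZapSub]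

theorem zipZapGo_eq (cs : List Char) (x : Nat) (res : List Char) :
    zipZapGo cs x res = res ++ zipZapSub (cs.drop x) := by
  by_cases hx : x < cs.length
  · rw [zipZapGo]
    simp only [hx, if_true]
    have hd : cs.drop x = cs[x] :: cs.drop (x + 1) := List.drop_eq_getElem_cons hx
    by_cases hc : x < cs.length - 2 ∧ cs.getD x ' ' = 'z' ∧ cs.getD (x + 2) ' ' = 'p'
    · obtain ⟨h2, hz, hp⟩ := hc
      have hx1 : x + 1 < cs.length := by omega
      have hx2 : x + 2 < cs.length := by omega
      rw [List.getD_eq_getElem _ _ hx] at hz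
      rw [List.getD_eq_getElem _ _ hx2] at hp
      simp only [h2, hz, hp, List.getD_eq_getElem _ _ hx, List.getD_eq_getElem _ _ hx2,
        and_true, if_true]
      rw [zipZapGo_eq cs (x + 3) _]
      have hd1 : cs.drop (x + 1) = cs[x + 1] :: cs.drop (x + 2) := List.drop_eq_getElem_cons hx1
      have hd2 : cs.drop (x + 2) = cs[x + 2] :: cs.drop (x + 3) := List.drop_eq_getElem_cons hx2
      rw [hd, hd1, hd2, hz, hp]
      rw [zipZapSub]
      simp
    · rw [if_neg hc, zipZapGo_eq cs (x + 1) _]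
      have : zipZapSub (cs.drop x) = cs[x] :: zipZapSub (cs.drop (x + 1)) := by
        by_cases h2 : x + 2 < cs.length
        · have hx1 : x + 1 < cs.length := by omega
          have hd1 : cs.drop (x + 1) = cs[x + 1] :: cs.drop (x + 2) := List.drop_eq_getElem_cons hx1
          have hd2 : cs.drop (x + 2) = cs[x + 2] :: cs.drop (x + 3) := List.drop_eq_getElem_cons h2
          rw [hd, hd1, hd2, zipZapSub]
          have hnc : ¬ (cs[x] = 'z' ∧ cs[x + 2] = 'p') := by
            intro ⟨hz, hp⟩
            exact hc ⟨by omega, by rw [List.getD_eq_getElem _ _ hx]; exact hz,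
              by rw [List.getD_eq_getElem _ _ h2]; exact hp⟩
          rw [if_neg hnc, ← hd2, ← hd1]
        · have hlen : (cs.drop x).length ≤ 2 := by simp [List.length_drop]; omega
          have hlen1 : (cs.drop (x + 1)).length ≤ 2 := by simp [List.length_drop]; omega
          rw [zipZapSub_short _ hlen, zipZapSub_short _ hlen1, hd]
      rw [this, List.getD_eq_getElem _ _ hx]
      simp
  · rw [zipZapGo]
    simp only [hx, if_false]
    rw [List.drop_eq_nil_of_le (by omega), zipZapSub_short _ (by simp)]
    simp
termination_by cs.length - x

-- ===== VERDICT (by name: the statement is the Claim_ definition above) =====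
theorem zipZap_spec : Claim_equal_zipZap := by
  intro zapper _
  unfold Spec_zipZap zipZap zipZap_alt
  by_cases h : zapper.toList.length < 3
  · rw [if_pos h, zipZapSub_short _ (by omega)]
    exact String.ofList_toList.symm
  · rw [if_neg h, zipZapGo_eq]
    simp
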